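-- pv_equiv track=rewrite | github.com/aled1027/sv_pipeline | sv_pipeline/smith_waterman.py | _alignment_string
-- ===== SOURCE A (Python) =====
-- def _alignment_string(aligned_seq1, aligned_seq2):
--     """Construct a special string showing identities, gaps, and mismatches.
--
--     This string is printed between the two aligned sequences and shows the
--     identities (|), gaps (-), and mismatches (:). As the string is constructed,
--     it also counts number of identities, gaps, and mismatches and returns the
--     counts along with the alignment string.
--
--     AAGGATGCCTCAAATCGATCT-TTTTCTTGG-
--     ::||::::::||:|::::::: |:  :||:|   <-- alignment string
--     CTGGTACTTGCAGAGAAGGGGGTA--ATTTGG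
--     """
--
--     # Build the string as a list of characters to avoid costly string
--     # concatenation.
--     idents, gaps, mismatches = 0, 0, 0
--     alignment_string = []
--     for base1, base2 in zip(aligned_seq1, aligned_seq2):
--         if base1 == base2:
--             alignment_string.append('|')
--             idents += 1
--         elif '-' in (base1, base2):
--             alignment_string.append(' ')
--             gaps += 1
--         else:
--             alignment_string.append(':')
--             mismatches += 1
--     return ''.join(alignment_string), idents, gaps, mismatches
-- ===== SOURCE B (Python) =====
-- def _alignment_string(aligned_seq1, aligned_seq2):
--     """Index-set formulation: collect the identity and gap positions, overwrite a
--     default-mismatch marker array at those positions, and derive the mismatch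
--     count arithmetically as n - idents - gaps."""
--     pairs = list(zip(aligned_seq1, aligned_seq2))
--     n = len(pairs)
--     eq_pos = [i for i, (a, b) in enumerate(pairs) if a == b]
--     gap_pos = [i for i, (a, b) in enumerate(pairs) if a != b and ('-' == a or '-' == b)]
--     marks = [':'] * n
--     for i in eq_pos:
--         marks[i] = '|'
--     for i in gap_pos:
--         marks[i] = ' '
--     return ''.join(marks), len(eq_pos), len(gap_pos), n - len(eq_pos) - len(gap_pos)
-- ===== Notes on version B (the rewrite author's own statement) =====
-- stated objective: alternative
-- what changed: A fuses marker construction with three running counters in one classifying loop; B instead collects the identity and gap POSITION lists with enumerate-filters, overwrites a default-mismatch marker array at those positions, and derives the mismatch count arithmetically as n - idents - gaps (no mismatch counter or classification of mismatches at all).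
import Mathlib
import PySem

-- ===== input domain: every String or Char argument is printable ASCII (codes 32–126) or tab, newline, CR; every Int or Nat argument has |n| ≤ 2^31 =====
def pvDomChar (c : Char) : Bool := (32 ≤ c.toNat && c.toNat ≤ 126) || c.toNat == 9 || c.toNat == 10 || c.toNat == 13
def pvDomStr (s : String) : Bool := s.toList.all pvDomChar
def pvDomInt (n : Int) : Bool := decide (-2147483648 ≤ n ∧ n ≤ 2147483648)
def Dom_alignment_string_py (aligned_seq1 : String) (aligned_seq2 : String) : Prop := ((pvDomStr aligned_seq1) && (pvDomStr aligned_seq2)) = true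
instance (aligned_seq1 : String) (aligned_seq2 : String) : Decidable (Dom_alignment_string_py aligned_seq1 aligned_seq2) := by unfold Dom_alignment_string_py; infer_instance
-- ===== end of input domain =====

-- B replaces A's fused marker/counter loop by an index-set formulation: collect identity and gap positions, overwrite a default-mismatch marker array at those positions, and derive the mismatch count arithmetically; same cost, different decomposition.


-- ===== PORT A =====
-- literal transliteration of A: one loop over zip, appending a marker char and bumping the matching counter
def alignment_string_py (aligned_seq1 : String) (aligned_seq2 : String) : String × Int × Int × Int :=
  let st := (aligned_seq1.toList.zip aligned_seq2.toList).foldl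
    (fun (acc : List Char × Int × Int × Int) bp =>
      let (al, idents, gaps, mismatches) := acc
      if bp.1 = bp.2 then (al ++ ['|'], idents + 1, gaps, mismatches)
      else if bp.1 = '-' ∨ bp.2 = '-' then (al ++ [' '], idents, gaps + 1, mismatches)
      else (al ++ [':'], idents, gaps, mismatches + 1))
    ([], 0, 0, 0)
  (String.ofList st.1, st.2.1, st.2.2.1, st.2.2.2)

-- ===== PORT B =====
-- the two position predicates of Source B's comprehensions
def pvEqP (p : Char × Char) : Bool := decide (p.1 = p.2)
def pvGapP (p : Char × Char) : Bool := decide (¬ p.1 = p.2 ∧ ('-' = p.1 ∨ '-' = p.2))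

-- literal transliteration of B: identity/gap position lists, overwrite a default ':' array, derived mismatch count
def alignment_string_py_alt (aligned_seq1 : String) (aligned_seq2 : String) : String × Int × Int × Int :=
  let pairs := aligned_seq1.toList.zip aligned_seq2.toList
  let n := pairs.length
  let eq_pos := ((PySem.List.enumerate pairs 0).filter (fun e => pvEqP e.2)).map (fun e => e.1)
  let gap_pos := ((PySem.List.enumerate pairs 0).filter (fun e => pvGapP e.2)).map (fun e => e.1)
  let marks0 := List.replicate n ':'
  let marks1 := eq_pos.foldl (fun m i => PySem.List.pySetD m i '|') marks0
  let marks2 := gap_pos.foldl (fun m i => PySem.List.pySetD m i ' ') marks1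
  (String.ofList marks2, (eq_pos.length : Int), (gap_pos.length : Int),
    (n : Int) - eq_pos.length - gap_pos.length)

-- ===== PRECONDITION & SPEC =====
def Spec_alignment_string_py (aligned_seq1 : String) (aligned_seq2 : String) (out : String × Int × Int × Int) : Prop := out = alignment_string_py_alt aligned_seq1 aligned_seq2
instance (aligned_seq1 : String) (aligned_seq2 : String) (out : String × Int × Int × Int) : Decidable (Spec_alignment_string_py aligned_seq1 aligned_seq2 out) := by unfold Spec_alignment_string_py; infer_instance

-- ===== CLAIM (what is proved, stated in full; the proofs are below) =====
def Claim_equal_alignment_string_py : Prop := ∀ (aligned_seq1 : String) (aligned_seq2 : String), Dom_alignment_string_py aligned_seq1 aligned_seq2 → Spec_alignment_string_py aligned_seq1 aligned_seq2 (alignment_string_py aligned_seq1 aligned_seq2)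

-- ===== LEMMAS AND PROOFS =====

-- the per-pair marker A's loop appends
def pvMarker (bp : Char × Char) : Char :=
  if bp.1 = bp.2 then '|' else if bp.1 = '-' ∨ bp.2 = '-' then ' ' else ':'

-- loop invariant for A's fold: the state is the markers so far plus the three counts so far
theorem alignment_fold_inv (l : List (Char × Char)) (al : List Char) (i g m : Int) :
    l.foldl
      (fun (acc : List Char × Int × Int × Int) bp =>
        let (al, idents, gaps, mismatches) := acc
        if bp.1 = bp.2 then (al ++ ['|'], idents + 1, gaps, mismatches)
        else if bp.1 = '-' ∨ bp.2 = '-' then (al ++ [' '], idents, gaps + 1, mismatches)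
        else (al ++ [':'], idents, gaps, mismatches + 1))
      (al, i, g, m)
    = (al ++ l.map pvMarker,
       i + ((l.filter pvEqP).length : Int),
       g + ((l.filter pvGapP).length : Int),
       m + ((l.length : Int) - (l.filter pvEqP).length - (l.filter pvGapP).length)) := by
  induction l generalizing al i g m with
  | nil => simp
  | cons hd tl ih =>
    simp only [List.foldl_cons, List.map_cons, List.filter_cons, List.length_cons]
    by_cases h1 : hd.1 = hd.2
    · simp [h1, pvMarker, pvEqP, pvGapP, ih]
      omega
    · by_cases h2 : hd.1 = '-' ∨ hd.2 = '-'
      · have h2' : '-' = hd.1 ∨ '-' = hd.2 := by tauto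
        simp [h1, h2, h2', pvMarker, pvEqP, pvGapP, ih]
        omega
      · have h2' : ¬ ('-' = hd.1 ∨ '-' = hd.2) := by tauto
        simp [h1, h2, h2', pvMarker, pvEqP, pvGapP, ih]
        omega

-- length of a filtered enumeration equals length of the filtered list
theorem filter_enumerate_length {α : Type} (P : α → Bool) (l : List α) (s : Int) :
    ((PySem.List.enumerate l s).filter (fun e => P e.2)).length = (l.filter P).length := by
  induction l generalizing s with
  | nil => simp [PySem.List.enumerate]
  | cons h t ih =>
    rw [PySem.List.enumerate_cons]
    simp only [List.filter_cons]
    by_cases hp : P h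
    · simp [hp, ih]
    · simp [hp, ih]

-- every collected position is a valid index
theorem posList_bounds {α : Type} (P : α → Bool) (l : List α) :
    ∀ x ∈ ((PySem.List.enumerate l 0).filter (fun e => P e.2)).map (fun e => e.1),
      0 ≤ x ∧ x < (l.length : Int) := by
  intro x hx
  simp only [List.mem_map, List.mem_filter, PySem.List.mem_enumerate_iff] at hx
  obtain ⟨e, ⟨⟨k, hk, he⟩, -⟩, hx1⟩ := hx
  subst he
  simp only [] at hx1
  omega

-- membership of a valid index in the collected positions decides the predicate
theorem mem_posList {α : Type} (P : α → Bool) (l : List α) (j : Nat) (hj : j < l.length) :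
    ((j : Int) ∈ ((PySem.List.enumerate l 0).filter (fun e => P e.2)).map (fun e => e.1)) ↔
      P (l[j]'hj) := by
  simp only [List.mem_map, List.mem_filter, PySem.List.mem_enumerate_iff]
  constructor
  · rintro ⟨e, ⟨⟨k, hk, he⟩, hP⟩, hfst⟩
    subst he
    simp only [] at hfst hP
    have : k = j := by omega
    subst this
    exact hP
  · intro hP
    exact ⟨((j : Int), l[j]'hj), ⟨⟨j, hj, by simp⟩, hP⟩, rfl⟩

-- overwriting at a list of in-range indices: length preserved
theorem setAll_length (c : Char) (idxs : List Int) (l : List Char) :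
    (idxs.foldl (fun m i => PySem.List.pySetD m i c) l).length = l.length := by
  induction idxs generalizing l with
  | nil => rfl
  | cons i t ih => simp [List.foldl_cons, ih, PySem.List.length_pySetD]

-- overwriting at a list of in-range indices: pointwise effect
theorem setAll_getElem? (c : Char) (idxs : List Int) (l : List Char)
    (hb : ∀ x ∈ idxs, 0 ≤ x ∧ x < (l.length : Int)) (j : Nat) :
    (idxs.foldl (fun m i => PySem.List.pySetD m i c) l)[j]? =
      if (j : Int) ∈ idxs then some c else l[j]? := by
  induction idxs generalizing l with
  | nil => simp
  | cons i t ih =>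
    obtain ⟨hi0, hil⟩ := hb i (List.mem_cons_self ..)
    have hset : PySem.List.pySetD l i c = l.set i.toNat c :=
      PySem.List.pySetD_of_nonneg l c hi0
    have hlen : (PySem.List.pySetD l i c).length = l.length := PySem.List.length_pySetD ..
    rw [List.foldl_cons, ih _ (fun x hx => by rw [hlen]; exact hb x (List.mem_cons_of_mem _ hx))]
    by_cases hmt : (j : Int) ∈ t
    · simp [hmt]
    · by_cases hij : (j : Int) = i
      · have hj : i.toNat = j := by omega
        have hjl : j < l.length := by omega
        simp [hij, hset, hj, hjl]
      · have : i.toNat ≠ j := by omega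
        simp [hmt, hij, hset, this]

-- the overwritten array is exactly the marker map
theorem marks_eq_map (l : List (Char × Char)) :
    (((PySem.List.enumerate l 0).filter (fun e => pvGapP e.2)).map (fun e => e.1)).foldl
        (fun m i => PySem.List.pySetD m i ' ')
      ((((PySem.List.enumerate l 0).filter (fun e => pvEqP e.2)).map (fun e => e.1)).foldl
        (fun m i => PySem.List.pySetD m i '|') (List.replicate l.length ':'))
    = l.map pvMarker := by
  have hlen1 := setAll_length '|'
    (((PySem.List.enumerate l 0).filter (fun e => pvEqP e.2)).map (fun e => e.1))
    (List.replicate l.length ':')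
  have hb1 : ∀ x ∈ ((PySem.List.enumerate l 0).filter (fun e => pvEqP e.2)).map (fun e => e.1),
      0 ≤ x ∧ x < ((List.replicate l.length (':' : Char)).length : Int) := by
    simpa using posList_bounds pvEqP l
  have hb2 : ∀ x ∈ ((PySem.List.enumerate l 0).filter (fun e => pvGapP e.2)).map (fun e => e.1),
      0 ≤ x ∧ x < (((((PySem.List.enumerate l 0).filter (fun e => pvEqP e.2)).map (fun e => e.1)).foldl
          (fun m i => PySem.List.pySetD m i '|') (List.replicate l.length ':')).length : Int) := by
    rw [hlen1]
    simpa using posList_bounds pvGapP l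
  apply List.ext_getElem?
  intro j
  by_cases hj : j < l.length
  · rw [setAll_getElem? _ _ _ hb2 j, setAll_getElem? _ _ _ hb1 j]
    simp only [mem_posList pvGapP l j hj, mem_posList pvEqP l j hj]
    rw [List.getElem?_map]
    have hrep : (List.replicate l.length (':' : Char))[j]? = some ':' := by
      simp [hj]
    rw [hrep]
    have hgl : l[j]? = some (l[j]'hj) := List.getElem?_eq_getElem hj
    rw [hgl]
    by_cases he : (l[j]'hj).1 = (l[j]'hj).2
    · have hng : ¬ pvGapP (l[j]'hj) = true := by simp [pvGapP, he]
      simp [hng, pvEqP, he, pvMarker]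
    · by_cases hd : '-' = (l[j]'hj).1 ∨ '-' = (l[j]'hj).2
      · have hd' : (l[j]'hj).1 = '-' ∨ (l[j]'hj).2 = '-' := by tauto
        simp [pvGapP, he, hd, pvMarker, hd']
      · have hd' : ¬ ((l[j]'hj).1 = '-' ∨ (l[j]'hj).2 = '-') := by tauto
        simp [pvGapP, pvEqP, he, hd, pvMarker, hd']
  · have hL : ((((PySem.List.enumerate l 0).filter (fun e => pvGapP e.2)).map (fun e => e.1)).foldl
        (fun m i => PySem.List.pySetD m i ' ')
        ((((PySem.List.enumerate l 0).filter (fun e => pvEqP e.2)).map (fun e => e.1)).foldl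
          (fun m i => PySem.List.pySetD m i '|') (List.replicate l.length ':'))).length = l.length := by
      rw [setAll_length, setAll_length, List.length_replicate]
    rw [List.getElem?_eq_none (by omega), List.getElem?_eq_none (by simp; omega)]

-- ===== VERDICT (by name: the statement is the Claim_ definition above) =====
theorem alignment_string_py_spec : Claim_equal_alignment_string_py := by
  intro s1 s2 _
  show _ = _
  set l := s1.toList.zip s2.toList with hl
  have hA := alignment_fold_inv l [] 0 0 0
  have hM := marks_eq_map l
  simp only [] at hM
  simp only [alignment_string_py, alignment_string_py_alt, ← hl, hA, hM]
  simp only [List.nil_append, zero_add]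
  refine Prod.ext rfl (Prod.ext ?_ (Prod.ext ?_ ?_)) <;>
    simp [filter_enumerate_length]
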